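-- pv_equiv track=rewrite | github.com/LouisSchiltz/exam-18-11 | dodona/ritsen.py | weven
-- ===== SOURCE A (Python) =====
-- def weven(a, b):
--
--     la, lb = len(a), len(b)
--     if la == 0 or lb == 0:
--         return []
--
--     n = max(la, lb)
--     resultaat = []
--     for i in range(n):
--         resultaat.append(a[i % la])
--         resultaat.append(b[i % lb])
--     return resultaat
-- ===== SOURCE B (Python) =====
-- def weven(a, b):
--     la, lb = len(a), len(b)
--     if la == 0 or lb == 0:
--         return []
--     n = max(la, lb)
--     a_ext = (a * (n // la + 1))[:n]
--     b_ext = (b * (n // lb + 1))[:n]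
--     return [x for pair in zip(a_ext, b_ext) for x in pair]
-- ===== Notes on version B (the rewrite author's own statement) =====
-- stated objective: idiomatic
-- what changed: Replaces the per-index modulo loop with explicitly materialized repeated lists (a * (n//la + 1) truncated to n) followed by a single zip/flatten comprehension.
import Mathlib
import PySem

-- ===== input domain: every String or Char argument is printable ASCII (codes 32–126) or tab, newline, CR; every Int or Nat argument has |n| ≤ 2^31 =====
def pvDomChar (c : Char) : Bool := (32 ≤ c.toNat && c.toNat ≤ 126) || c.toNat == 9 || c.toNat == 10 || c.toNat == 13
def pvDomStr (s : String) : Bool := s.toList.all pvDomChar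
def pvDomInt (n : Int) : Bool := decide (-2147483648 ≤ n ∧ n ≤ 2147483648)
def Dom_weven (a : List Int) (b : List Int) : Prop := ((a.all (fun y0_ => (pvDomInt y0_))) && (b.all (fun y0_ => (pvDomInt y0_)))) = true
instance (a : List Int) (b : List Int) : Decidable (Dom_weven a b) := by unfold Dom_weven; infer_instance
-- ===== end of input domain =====

-- B replaces A's per-index modulo loop by materialized repeated lists zipped and flattened (idiomatic decomposition, same cost).

-- ===== PORT A =====
-- a[i % la] always has its index in range (0 ≤ i % la < la), so pyGetD with default 0 is exact here.
def weven (a : List Int) (b : List Int) : List Int :=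
  let la : Int := a.length
  let lb : Int := b.length
  if la = 0 ∨ lb = 0 then []
  else
    (PySem.List.pyRange 0 (max la lb) 1).foldl
      (fun acc i =>
        (acc ++ [PySem.List.pyGetD a (PySem.Int.mod i la) 0]) ++ [PySem.List.pyGetD b (PySem.Int.mod i lb) 0]) []

-- ===== PORT B =====
def weven_alt (a : List Int) (b : List Int) : List Int :=
  if a.length = 0 ∨ b.length = 0 then []
  else
    let n := max a.length b.length
    let aext := ((List.replicate (n / a.length + 1) a).flatten).take n
    let bext := ((List.replicate (n / b.length + 1) b).flatten).take n
    (aext.zip bext).flatMap (fun p => [p.1, p.2])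

-- ===== PRECONDITION & SPEC =====
def Spec_weven (a : List Int) (b : List Int) (out : List Int) : Prop := out = weven_alt a b
instance (a : List Int) (b : List Int) (out : List Int) : Decidable (Spec_weven a b out) := by unfold Spec_weven; infer_instance

-- ===== CLAIM (what is proved, stated in full; the proofs are below) =====
def Claim_equal_weven : Prop := ∀ (a : List Int) (b : List Int), Dom_weven a b → Spec_weven a b (weven a b)

-- ===== LEMMAS AND PROOFS =====

-- indexing into k copies of a list is modular indexing
lemma flatten_replicate_getElem? (a : List Int) (k i : Nat) (hi : i < k * a.length) :
    ((List.replicate k a).flatten)[i]? = a[i % a.length]? := by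
  induction k generalizing i with
  | zero => rw [Nat.zero_mul] at hi; omega
  | succ k ih =>
    have hm : (k + 1) * a.length = k * a.length + a.length := by ring
    have ha : 0 < a.length := by
      by_contra h
      have h0 : a.length = 0 := by omega
      rw [h0, Nat.mul_zero] at hi
      omega
    simp only [List.replicate_succ, List.flatten_cons]
    by_cases h : i < a.length
    · rw [List.getElem?_append_left h, Nat.mod_eq_of_lt h]
    · rw [List.getElem?_append_right (by omega)]
      rw [ih (i - a.length) (by omega)]
      congr 1
      exact (Nat.mod_eq_sub_mod (by omega)).symm

lemma length_flatten_replicate (a : List Int) (k : Nat) :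
    ((List.replicate k a).flatten).length = k * a.length := by
  induction k with
  | zero => simp
  | succ k ih => simp [List.replicate_succ, ih]; ring

-- interleaving a zip equals the range-indexed flatMap
lemma zip_flatMap_eq (n : Nat) (xs ys : List Int) (F G : Nat → Int)
    (hx : xs.length = n) (hy : ys.length = n)
    (hF : ∀ i, (h : i < n) → xs[i] = F i) (hG : ∀ i, (h : i < n) → ys[i] = G i) :
    (xs.zip ys).flatMap (fun p => [p.1, p.2]) = (List.range n).flatMap (fun i => [F i, G i]) := by
  induction n generalizing xs ys F G with
  | zero =>
    have : xs = [] := List.eq_nil_of_length_eq_zero hx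
    subst this
    simp
  | succ n ih =>
    cases xs with
    | nil => simp at hx
    | cons x xs' =>
      cases ys with
      | nil => simp at hy
      | cons y ys' =>
        have hx' : xs'.length = n := by simpa using hx
        have hy' : ys'.length = n := by simpa using hy
        have h0 : x = F 0 := by simpa using hF 0 (Nat.succ_pos n)
        have g0 : y = G 0 := by simpa using hG 0 (Nat.succ_pos n)
        have hrec := ih xs' ys' (fun i => F (i + 1)) (fun i => G (i + 1)) hx' hy'
          (fun i h => by simpa using hF (i + 1) (by omega))
          (fun i h => by simpa using hG (i + 1) (by omega))
        rw [List.range_succ_eq_map]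
        simp only [List.zip_cons_cons, List.flatMap_cons, List.flatMap_map]
        rw [hrec, h0, g0]

-- A's fold computes the range-indexed flatMap
lemma weven_eq_core (a b : List Int) (ha : a.length ≠ 0) (hb : b.length ≠ 0) :
    weven a b = (List.range (max a.length b.length)).flatMap
      (fun k => [a.getD (k % a.length) 0, b.getD (k % b.length) 0]) := by
  unfold weven
  have ha' : (a.length : Int) ≠ 0 := by exact_mod_cast ha
  have hb' : (b.length : Int) ≠ 0 := by exact_mod_cast hb
  rw [if_neg (by simp; exact ⟨fun h => ha (by simp [h]), fun h => hb (by simp [h])⟩)]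
  have hfun : (fun (acc : List Int) (i : Int) =>
      (acc ++ [PySem.List.pyGetD a (PySem.Int.mod i (a.length : Int)) 0]) ++
        [PySem.List.pyGetD b (PySem.Int.mod i (b.length : Int)) 0]) =
      (fun (acc : List Int) (i : Int) => acc ++
        ([PySem.List.pyGetD a (PySem.Int.mod i (a.length : Int)) 0] ++
         [PySem.List.pyGetD b (PySem.Int.mod i (b.length : Int)) 0])) := by
    funext acc i; simp
  rw [hfun, PySem.List.foldl_append_eq_flatMap]
  rw [PySem.List.pyRange_one]
  rw [List.flatMap_map]
  have hmax : ((max (a.length : Int) (b.length : Int) - 0).toNat) = max a.length b.length := by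
    omega
  rw [hmax]
  simp only [List.nil_append]
  congr 1
  funext k
  have h1 : (0 : Int) + (k : Int) = (k : Int) := by ring
  rw [h1, PySem.Int.mod_natCast, PySem.Int.mod_natCast,
      PySem.List.pyGetD_natCast a, PySem.List.pyGetD_natCast b]
  rfl
lemma le_repeat_len (n la : Nat) (ha : la ≠ 0) : n ≤ (n / la + 1) * la := by
  have h1 := Nat.div_add_mod n la
  have h2 := Nat.mod_lt n (show 0 < la by omega)
  have h3 : (n / la + 1) * la = la * (n / la) + la := by ring
  omega

lemma length_ext (a : List Int) (n : Nat) (ha : a.length ≠ 0) :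
    (((List.replicate (n / a.length + 1) a).flatten).take n).length = n := by
  rw [List.length_take, length_flatten_replicate]
  exact Nat.min_eq_left (le_repeat_len n a.length ha)

lemma getElem_ext (a : List Int) (n i : Nat) (ha : a.length ≠ 0) (hi : i < n)
    (h : i < (((List.replicate (n / a.length + 1) a).flatten).take n).length) :
    (((List.replicate (n / a.length + 1) a).flatten).take n)[i] = a.getD (i % a.length) 0 := by
  have hle := le_repeat_len n a.length ha
  have hfl : i < ((List.replicate (n / a.length + 1) a).flatten).length := by
    rw [length_flatten_replicate]; omega
  have hlt : i % a.length < a.length := Nat.mod_lt _ (by omega)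
  have hopt := flatten_replicate_getElem? a (n / a.length + 1) i
    (by rw [← length_flatten_replicate a (n / a.length + 1)]; exact hfl)
  rw [List.getElem?_eq_getElem hfl, List.getElem?_eq_getElem hlt] at hopt
  have hval : ((List.replicate (n / a.length + 1) a).flatten)[i]'hfl = a[i % a.length]'hlt :=
    Option.some.inj hopt
  rw [List.getElem_take, hval]
  simp [List.getD, List.getElem?_eq_getElem hlt]

-- B computes the same range-indexed flatMap
lemma weven_alt_eq_core (a b : List Int) (ha : a.length ≠ 0) (hb : b.length ≠ 0) :
    weven_alt a b = (List.range (max a.length b.length)).flatMap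
      (fun k => [a.getD (k % a.length) 0, b.getD (k % b.length) 0]) := by
  unfold weven_alt
  rw [if_neg (by simp [ha, hb])]
  exact zip_flatMap_eq (max a.length b.length) _ _
    (fun k => a.getD (k % a.length) 0) (fun k => b.getD (k % b.length) 0)
    (length_ext a _ ha) (length_ext b _ hb)
    (fun i hi => getElem_ext a _ i ha hi (by rw [length_ext a _ ha]; exact hi))
    (fun i hi => getElem_ext b _ i hb hi (by rw [length_ext b _ hb]; exact hi))

theorem weven_spec : Claim_equal_weven := by
  intro a b _
  unfold Spec_weven
  by_cases ha : a.length = 0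
  · simp [weven, weven_alt, ha]
  by_cases hb : b.length = 0
  · simp [weven, weven_alt, hb]
  rw [weven_eq_core a b ha hb, weven_alt_eq_core a b ha hb]
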